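-- pv_equiv track=rewrite | github.com/maiam6242/braille-printer | Software/Text_Side/translator.py | find_caps
-- ===== SOURCE A (Python) =====
-- def find_caps(segment):
--     '''
--     Finds every capital letter or word and inserts the corresponding characters in braille
--     Args: segment in English
--     Returns: The segment in English with a weird symbol
--     (non-english)characters interspersed to denote capitalization
--     i.e. MAIA -> ||MAIA  or Maia -> | Maia
--
--     # >>> find_caps('HELLO')
--     # 'ηHELLO'
--     # >>> find_caps('Hello')
--     # 'ζHello'
--     # >>> find_caps('HI THERE I am wondering what You think About this wacky STRING')
--     # 'ηHI ηTHERE ζI am wondering what ζYou think ζAbout this wacky ηSTRING'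
--     # >>> find_caps('HEy! This is super COOOL! Cool cool CooL! HOw do you feeEEEEl?')
--     # 'ηHEy! ζThis is super ηCOOOL! ζCool cool ζCooζL! ηHOw do you feeηEEEEl?'
--     '''
--     #TODO: Whatever you make this letter(s) associate it with the cap letter and
--     # cap word things in the dictionary, so that the translate_text
--     # function can recognize everything
--     #TODO: Talk to real people about how capitals work so we can handle them better
--     # Notes:
--         #  For some reason setting newlist_segment = list_segment causes them both to
--         # be changed when one is so adding list() fixes this for reasons I don't understand
--         # islower() and isupper() both return false if the string is a space so you
--         #  need to use not isupper() which is super annoying but works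
--
--     list_segment = list(segment)
--     newlist_segment = list(list_segment)
--     offset = 0
--     for i, _ in enumerate(list_segment):
--         if i == 0:
--             lastupper = False # If there is no character
--                         #before it tell it that the last character was not uppercase
--         else:
--             lastupper = list_segment[i-1].isupper()
--
--         if list_segment[i].isupper():
--             if i < len(list_segment) -1 and list_segment[i+1].isupper() and not lastupper:
--                 newlist_segment.insert(i+offset, 'η')
--                 offset += 1
--             else:
--                 if not lastupper:
--                     newlist_segment.insert(i+offset, 'ζ')
--                     offset += 1
--
--
--     output_string = ''
--     return output_string.join(newlist_segment)
-- ===== SOURCE B (Python) =====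
-- from itertools import groupby
--
-- def find_caps(segment):
--     # Split into maximal runs of same isupper() status; prefix each uppercase
--     # run with 'η' (len >= 2) or 'ζ' (len 1).
--     out = []
--     for isup, grp in groupby(segment, key=str.isupper):
--         run = list(grp)
--         if isup:
--             out.append('η' if len(run) >= 2 else 'ζ')
--         out.extend(run)
--     return ''.join(out)
-- ===== Notes on version B (the rewrite author's own statement) =====
-- stated objective: simpler
-- what changed: Replaces the index loop with offset-tracked insertions into a copied list by a single groupby pass over maximal isupper() runs, prefixing each uppercase run with the marker chosen by its length.
import Mathlib
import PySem

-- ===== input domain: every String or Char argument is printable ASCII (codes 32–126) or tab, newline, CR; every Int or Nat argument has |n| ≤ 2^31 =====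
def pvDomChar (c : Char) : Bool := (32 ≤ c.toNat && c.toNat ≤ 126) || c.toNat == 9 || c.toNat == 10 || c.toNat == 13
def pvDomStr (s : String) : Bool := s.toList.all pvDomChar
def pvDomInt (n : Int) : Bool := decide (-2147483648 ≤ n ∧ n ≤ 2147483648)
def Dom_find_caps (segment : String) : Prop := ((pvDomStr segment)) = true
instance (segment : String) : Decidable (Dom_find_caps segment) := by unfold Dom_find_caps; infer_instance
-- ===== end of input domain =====

-- B replaces A's index loop with offset-tracked list insertions by a single pass
-- over maximal isupper() runs, prefixing each uppercase run with its marker (simpler).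


-- ===== PORT A =====
-- list_segment[j].isupper(); every call site passes an in-range index, so the
-- getD default is never taken (Python would raise only out of range).
def upAt (chars : List Char) (j : Int) : Bool :=
  ((PySem.List.pyGet? chars j).map PySem.Chars.isupper).getD false

-- the 'for i, _ in enumerate(list_segment)' loop, state = (newlist_segment, offset)
def find_caps_loop (chars : List Char) : List (Int × Char) → List Char → Int → List Char
  | [], newlist, _ => newlist
  | (i, _) :: rest, newlist, offset =>
    let lastupper := if i = 0 then false else upAt chars (i - 1)
    if upAt chars i then
      if decide (i < (chars.length : Int) - 1) && upAt chars (i + 1) && !lastupper then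
        find_caps_loop chars rest (PySem.List.insert newlist (i + offset) 'η') (offset + 1)
      else if !lastupper then
        find_caps_loop chars rest (PySem.List.insert newlist (i + offset) 'ζ') (offset + 1)
      else
        find_caps_loop chars rest newlist offset
    else
      find_caps_loop chars rest newlist offset

-- newlist_segment starts as a copy of list_segment; ''.join at the end
def find_caps (segment : String) : String :=
  String.ofList (find_caps_loop segment.toList (PySem.List.enumerate segment.toList) segment.toList 0)

-- ===== PORT B =====
-- itertools.groupby(segment, key=str.isupper): maximal runs with their key
def groupRuns : List Char → List (Bool × List Char)
  | [] => []
  | c :: cs =>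
    let k := PySem.Chars.isupper c
    (k, c :: cs.takeWhile (fun d => PySem.Chars.isupper d == k)) ::
      groupRuns (cs.dropWhile (fun d => PySem.Chars.isupper d == k))
termination_by l => l.length
decreasing_by
  simpa using Nat.lt_succ_of_le (List.length_dropWhile_le _ _)

def find_caps_alt (segment : String) : String :=
  String.ofList
    ((groupRuns segment.toList).foldl
      (fun out g =>
        out ++ (if g.1 then [if g.2.length ≥ 2 then 'η' else 'ζ'] else []) ++ g.2)
      [])

-- ===== PRECONDITION & SPEC =====
def Spec_find_caps (segment : String) (out : String) : Prop := out = find_caps_alt segment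
instance (segment : String) (out : String) : Decidable (Spec_find_caps segment out) := by unfold Spec_find_caps; infer_instance

-- ===== CLAIM (what is proved, stated in full; the proofs are below) =====
def Claim_equal_find_caps : Prop := ∀ (segment : String), Dom_find_caps segment → Spec_find_caps segment (find_caps segment)

-- ===== LEMMAS AND PROOFS =====

-- common reference: one pass threading "was the previous character uppercase"
def goSpec : Bool → List Char → List Char
  | _, [] => []
  | lu, c :: cs =>
    if PySem.Chars.isupper c && !lu then
      (if ((cs.head?.map PySem.Chars.isupper).getD false) then 'η' else 'ζ') :: c :: goSpec true cs
    else
      c :: goSpec (PySem.Chars.isupper c) cs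

def luOf (pre : List Char) : Bool :=
  ((pre.getLast?.map PySem.Chars.isupper).getD false)

lemma upAt_append_length (pre suf : List Char) (c : Char) :
    upAt (pre ++ c :: suf) (pre.length : Int) = PySem.Chars.isupper c := by
  simp [upAt]

lemma upAt_append_pred (pre suf : List Char) (h : pre ≠ []) :
    upAt (pre ++ suf) ((pre.length : Int) - 1) = luOf pre := by
  have h1 : 0 < pre.length := List.length_pos_iff.mpr h
  have h2 : ((pre.length : Int) - 1) = ((pre.length - 1 : Nat) : Int) := by omega
  rw [h2, upAt, PySem.List.pyGet?_natCast, List.getElem?_append_left (by omega),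
    ← List.getLast?_eq_getElem?]
  rfl

lemma insert_mid (done : List Char) (m : Char) (tl : List Char) :
    PySem.List.insert (done ++ tl) ((done.length : Int)) m = done ++ m :: tl := by
  rw [PySem.List.insert_natCast _ _ _ (by simp)]
  simp

lemma loopA_eq (suf : List Char) : ∀ (pre done : List Char),
    find_caps_loop (pre ++ suf) (PySem.List.enumerate suf (pre.length : Int))
      (done ++ suf) ((done.length : Int) - (pre.length : Int))
    = done ++ goSpec (luOf pre) suf := by
  induction suf with
  | nil => intro pre done; simp [find_caps_loop, goSpec, PySem.List.enumerate]
  | cons c cs ih =>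
    intro pre done
    rw [PySem.List.enumerate_cons]
    simp only [find_caps_loop]
    have hlu : (if (pre.length : Int) = 0 then false
        else upAt (pre ++ c :: cs) ((pre.length : Int) - 1)) = luOf pre := by
      by_cases hp : pre = []
      · subst hp; simp [luOf]
      · rw [if_neg (by have := List.length_pos_iff.mpr hp; omega), upAt_append_pred _ _ hp]
    have hcur : upAt (pre ++ c :: cs) (pre.length : Int) = PySem.Chars.isupper c :=
      upAt_append_length pre cs c
    have hnext : (decide ((pre.length : Int) < ((pre ++ c :: cs).length : Int) - 1)
        && upAt (pre ++ c :: cs) ((pre.length : Int) + 1))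
        = ((cs.head?.map PySem.Chars.isupper).getD false) := by
      cases cs with
      | nil => simp
      | cons d ds =>
        have hc : ((pre.length : Int) + 1) = ((pre.length + 1 : Nat) : Int) := by omega
        have h3 : PySem.List.pyGet? (pre ++ c :: d :: ds) ((pre.length + 1 : Nat) : Int)
            = some d := by
          rw [PySem.List.pyGet?_natCast, List.getElem?_append_right (by omega)]
          simp
        have h4 : ((pre.length : Int) < ((pre ++ c :: d :: ds).length : Int) - 1) := by
          simp; omega
        rw [hc, upAt, h3]
        simp only [Option.map_some, Option.getD_some, List.head?_cons]
        rw [decide_eq_true h4]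
        simp
    rw [hlu, hcur, hnext]
    have key : ∀ m : Char,
        find_caps_loop (pre ++ c :: cs) (PySem.List.enumerate cs ((pre.length : Int) + 1))
          ((done ++ [m, c]) ++ cs) (((done ++ [m, c]).length : Int) - ((pre.length : Int) + 1))
        = (done ++ [m, c]) ++ goSpec (PySem.Chars.isupper c) cs := by
      intro m
      have h := ih (pre ++ [c]) (done ++ [m, c])
      rw [show pre ++ [c] ++ cs = pre ++ c :: cs by simp,
        show (((pre ++ [c]).length : Nat) : Int) = (pre.length : Int) + 1 by simp,
        show luOf (pre ++ [c]) = PySem.Chars.isupper c by simp [luOf]] at h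
      exact h
    have key0 :
        find_caps_loop (pre ++ c :: cs) (PySem.List.enumerate cs ((pre.length : Int) + 1))
          ((done ++ [c]) ++ cs) (((done ++ [c]).length : Int) - ((pre.length : Int) + 1))
        = (done ++ [c]) ++ goSpec (PySem.Chars.isupper c) cs := by
      have h := ih (pre ++ [c]) (done ++ [c])
      rw [show pre ++ [c] ++ cs = pre ++ c :: cs by simp,
        show (((pre ++ [c]).length : Nat) : Int) = (pre.length : Int) + 1 by simp,
        show luOf (pre ++ [c]) = PySem.Chars.isupper c by simp [luOf]] at h
      exact h
    by_cases hu : PySem.Chars.isupper c = true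
    · by_cases hl : luOf pre = true
      · -- uppercase but previous char uppercase: no marker inserted
        rw [hu, hl]
        simp only [Bool.not_true, Bool.and_false, Bool.false_eq_true, reduceIte]
        rw [show (done.length : Int) - (pre.length : Int)
            = (((done ++ [c]).length : Nat) : Int) - ((pre.length : Int) + 1) by simp only [List.length_append, List.length_cons, List.length_nil, Nat.cast_add, Nat.cast_one, Nat.cast_zero]; ring,
          show done ++ c :: cs = (done ++ [c]) ++ cs by simp, key0]
        simp [goSpec, hu, hl]
      · -- uppercase after non-uppercase: marker inserted before position i
        rw [hu, (by simpa using hl : luOf pre = false)]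
        have hins : ∀ m : Char,
            PySem.List.insert (done ++ c :: cs)
              ((pre.length : Int) + ((done.length : Int) - (pre.length : Int))) m
            = (done ++ [m, c]) ++ cs := by
          intro m
          rw [show (pre.length : Int) + ((done.length : Int) - (pre.length : Int))
              = ((done.length : Nat) : Int) by ring, insert_mid]
          simp
        cases hh : ((cs.head?.map PySem.Chars.isupper).getD false) with
        | true =>
          simp only [Bool.not_false, Bool.and_true, reduceIte]
          rw [hins 'η',
            show ((done.length : Int) - (pre.length : Int)) + 1
              = (((done ++ ['η', c]).length : Nat) : Int) - ((pre.length : Int) + 1) by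
                simp only [List.length_append, List.length_cons, List.length_nil, Nat.cast_add, Nat.cast_one, Nat.cast_zero]; ring,
            key 'η']
          simp [goSpec, hu, hh]
        | false =>
          simp only [Bool.not_false, Bool.and_true, Bool.false_and, Bool.false_eq_true,
            reduceIte]
          rw [hins 'ζ',
            show ((done.length : Int) - (pre.length : Int)) + 1
              = (((done ++ ['ζ', c]).length : Nat) : Int) - ((pre.length : Int) + 1) by
                simp only [List.length_append, List.length_cons, List.length_nil, Nat.cast_add, Nat.cast_one, Nat.cast_zero]; ring,
            key 'ζ']
          simp [goSpec, hu, hh]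
    · -- not uppercase: no marker inserted
      rw [(by simpa using hu : PySem.Chars.isupper c = false)]
      simp only [Bool.false_eq_true, Bool.and_false, Bool.false_and, if_false]
      rw [show (done.length : Int) - (pre.length : Int)
          = (((done ++ [c]).length : Nat) : Int) - ((pre.length : Int) + 1) by simp only [List.length_append, List.length_cons, List.length_nil, Nat.cast_add, Nat.cast_one, Nat.cast_zero]; ring,
        show done ++ c :: cs = (done ++ [c]) ++ cs by simp, key0]
      simp [goSpec, (by simpa using hu : PySem.Chars.isupper c = false)]

lemma goSpec_upper_run : ∀ (run rest : List Char),
    (∀ x ∈ run, PySem.Chars.isupper x = true) →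
    (∀ d ∈ rest.head?, PySem.Chars.isupper d = false) →
    goSpec true (run ++ rest) = run ++ goSpec false rest := by
  intro run
  induction run with
  | nil =>
    intro rest _ hr
    cases rest with
    | nil => rfl
    | cons d ds => simp [goSpec, hr d rfl]
  | cons x xs ih =>
    intro rest h hr
    simp only [List.cons_append, goSpec, h x (by simp), Bool.not_true, Bool.and_false,
      if_neg Bool.false_ne_true]
    rw [ih rest (fun y hy => h y (by simp [hy])) hr]

lemma goSpec_lower_run : ∀ (run rest : List Char),
    (∀ x ∈ run, PySem.Chars.isupper x = false) →
    goSpec false (run ++ rest) = run ++ goSpec false rest := by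
  intro run
  induction run with
  | nil => intro rest _; rfl
  | cons x xs ih =>
    intro rest h
    simp only [List.cons_append, goSpec, h x (by simp), Bool.false_and,
      if_neg Bool.false_ne_true]
    rw [ih rest (fun y hy => h y (by simp [hy]))]

lemma foldB_eq (n : Nat) : ∀ (l : List Char), l.length ≤ n → ∀ (out : List Char),
    (groupRuns l).foldl
      (fun out g =>
        out ++ (if g.1 then [if g.2.length ≥ 2 then 'η' else 'ζ'] else []) ++ g.2)
      out
    = out ++ goSpec false l := by
  induction n with
  | zero =>
    intro l hl out
    cases l with
    | nil => simp [groupRuns, goSpec]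
    | cons c cs => simp at hl
  | succ n ih =>
    intro l hl out
    cases l with
    | nil => simp [groupRuns, goSpec]
    | cons c cs =>
      rw [groupRuns]
      set k := PySem.Chars.isupper c with hk
      set run := cs.takeWhile (fun d => PySem.Chars.isupper d == k) with hrun
      set rest := cs.dropWhile (fun d => PySem.Chars.isupper d == k) with hrest
      have hcs : run ++ rest = cs := List.takeWhile_append_dropWhile
      have hrestlen : rest.length ≤ n := by
        have := List.length_dropWhile_le (fun d => PySem.Chars.isupper d == k) cs
        rw [← hrest] at this
        simp at hl; omega
      have hrunmem : ∀ x ∈ run, PySem.Chars.isupper x = k := by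
        intro x hx
        have := List.mem_takeWhile_imp hx
        simpa using this
      have hresthead : ∀ d ∈ rest.head?, (PySem.Chars.isupper d == k) = false := by
        intro d hd
        have := List.head?_dropWhile_not (fun d => PySem.Chars.isupper d == k) cs
        rw [← hrest] at this
        cases hh : rest.head? with
        | none => simp [hh] at hd
        | some e => simp [hh] at this hd; simp [hd ▸ this]
      rw [List.foldl_cons, ih rest hrestlen _]
      rw [← hcs]
      clear_value k run rest
      cases hkv : k with
      | true =>
        have hresthead' : ∀ d ∈ rest.head?, PySem.Chars.isupper d = false := by
          intro d hd; have := hresthead d hd; rw [hkv] at this; simpa using this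
        have hup : PySem.Chars.isupper c = true := hk ▸ hkv
        have hmem : ∀ x ∈ run, PySem.Chars.isupper x = true := by
          intro x hx; rw [hrunmem x hx, hkv]
        rw [show goSpec false (c :: (run ++ rest)) = (if (((run ++ rest).head?.map PySem.Chars.isupper).getD false) then 'η' else 'ζ') :: c :: goSpec true (run ++ rest) by simp [goSpec, hup]]
        rw [goSpec_upper_run run rest hmem hresthead']
        cases run with
        | nil =>
          cases rest with
          | nil => simp
          | cons d ds =>
            have hd := hresthead' d (by simp)
            simp [hd]
        | cons r rs =>
          have hr := hmem r (by simp)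
          simp [hr]
      | false =>
        have hup : PySem.Chars.isupper c = false := hk ▸ hkv
        have hmem : ∀ x ∈ run, PySem.Chars.isupper x = false := by
          intro x hx; rw [hrunmem x hx, hkv]
        rw [show goSpec false (c :: (run ++ rest)) = c :: goSpec false (run ++ rest) by simp [goSpec, hup]]
        rw [goSpec_lower_run run rest hmem]
        simp

-- ===== VERDICT (by name: the statement is the Claim_ definition above) =====
theorem find_caps_spec : Claim_equal_find_caps := by
  intro segment _
  have hA := loopA_eq segment.toList [] []
  have hB := foldB_eq segment.toList.length segment.toList le_rfl []
  simp only [List.nil_append, List.length_nil, Nat.cast_zero, sub_zero] at hA hB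
  unfold Spec_find_caps find_caps find_caps_alt
  rw [hA, hB]
  rfl
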